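-- pv_equiv track=rewrite | github.com/J-millar99/algorithm | Programmers/Lv0/공던지기.py | solution
-- ===== SOURCE A (Python) =====
-- def solution(numbers, k):
--     cnt = 1
--     idx = 0
--     while cnt != k:
--         idx += 2
--         if idx > len(numbers) - 1:
--             idx -= len(numbers)
--         cnt += 1
--     return numbers[idx]
-- ===== SOURCE B (Python) =====
-- def solution(numbers, k):
--     return numbers[(2 * (k - 1)) % len(numbers)]
-- ===== Notes on version B (the rewrite author's own statement) =====
-- stated objective: faster
-- what changed: Replaces the O(k) simulation loop by the closed-form index numbers[(2*(k-1)) % len(numbers)].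
import Mathlib
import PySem

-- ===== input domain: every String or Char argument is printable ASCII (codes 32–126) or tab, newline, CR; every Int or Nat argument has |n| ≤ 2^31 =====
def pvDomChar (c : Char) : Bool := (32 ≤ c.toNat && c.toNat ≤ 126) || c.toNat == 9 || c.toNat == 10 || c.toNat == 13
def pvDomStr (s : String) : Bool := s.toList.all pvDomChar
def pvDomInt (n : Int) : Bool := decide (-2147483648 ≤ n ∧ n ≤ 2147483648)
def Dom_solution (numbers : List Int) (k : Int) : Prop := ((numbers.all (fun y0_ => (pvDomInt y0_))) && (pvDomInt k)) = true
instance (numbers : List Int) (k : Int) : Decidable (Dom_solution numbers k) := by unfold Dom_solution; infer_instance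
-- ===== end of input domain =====

-- ===== PORT A =====
-- B replaces A's per-throw simulation loop by the closed-form index (2*(k-1)) % len(numbers).
-- loop body of A: idx += 2; if idx > len(numbers)-1: idx -= len(numbers); runs until cnt = k
def solutionLoop (n : Int) (fuel : Nat) (idx : Int) : Int :=
  match fuel with
  | 0 => idx
  | f + 1 =>
    let idx1 := idx + 2
    let idx2 := if idx1 > n - 1 then idx1 - n else idx1
    solutionLoop n f idx2

def solution (numbers : List Int) (k : Int) : Int :=
  ((PySem.List.pyGet? numbers (solutionLoop (numbers.length : Int) (k - 1).toNat 0)).getD 0)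

-- ===== PORT B =====
def solution_alt (numbers : List Int) (k : Int) : Int :=
  ((PySem.List.pyGet? numbers (PySem.Int.mod (2 * (k - 1)) (numbers.length : Int))).getD 0)

-- ===== PRECONDITION & SPEC =====
-- Pre_ excludes inputs on which the Python A does not return normally: k < 1 (the while loop never
-- terminates), the empty list (IndexError), and a one-element list with k >= 2 (A's subtract-once
-- wraparound leaves idx = 1, IndexError).
def Pre_solution (numbers : List Int) (k : Int) : Prop :=
  1 ≤ k ∧ numbers ≠ [] ∧ (2 ≤ numbers.length ∨ k = 1)
instance (numbers : List Int) (k : Int) : Decidable (Pre_solution numbers k) := by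
  unfold Pre_solution; infer_instance
def pvWitness_solution : List Int × Int := ([3, 1, 4], 5)

def Spec_solution (numbers : List Int) (k : Int) (out : Int) : Prop := out = solution_alt numbers k
instance (numbers : List Int) (k : Int) (out : Int) : Decidable (Spec_solution numbers k out) := by unfold Spec_solution; infer_instance

-- ===== CLAIM (what is proved, stated in full; the proofs are below) =====
def Claim_equal_solution : Prop := ∀ (numbers : List Int) (k : Int), Dom_solution numbers k → Pre_solution numbers k → Spec_solution numbers k (solution numbers k)
-- ===== LEMMAS AND PROOFS =====
-- For n >= 2 and 0 <= idx < n, A's loop computes (idx + 2*fuel) mod n.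
theorem solutionLoop_mod (n : Int) (hn : 2 ≤ n) :
    ∀ (fuel : Nat) (idx : Int), 0 ≤ idx → idx < n →
      solutionLoop n fuel idx = (idx + 2 * fuel) % n := by
  intro fuel
  induction fuel with
  | zero =>
    intro idx h0 h1
    simp [solutionLoop, Int.emod_eq_of_lt h0 h1]
  | succ f ih =>
    intro idx h0 h1
    simp only [solutionLoop]
    by_cases h : idx + 2 > n - 1
    · simp only [if_pos h]
      rw [ih (idx + 2 - n) (by omega) (by omega)]
      have : idx + 2 - n + 2 * (f : Int) = (idx + 2 * (f + 1 : Nat)) - 1 * n := by push_cast; ring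
      rw [this, Int.sub_mul_emod_self_right]
    · simp only [if_neg h]
      rw [ih (idx + 2) (by omega) (by omega)]
      congr 1
      push_cast; ring

-- ===== VERDICT (by name: the statement is the Claim_ definition above) =====
theorem solution_spec : Claim_equal_solution := by
  intro numbers k _ hpre
  obtain ⟨hk, hne, hcase⟩ := hpre
  unfold Spec_solution solution solution_alt
  have hlen : 1 ≤ numbers.length := List.length_pos_iff.mpr hne
  have hmod : PySem.Int.mod (2 * (k - 1)) (numbers.length : Int)
      = (2 * (k - 1)) % (numbers.length : Int) :=
    PySem.Int.mod_eq_emod_of_pos (by exact_mod_cast hlen)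
  rcases hcase with h2 | h1
  · rw [solutionLoop_mod (numbers.length : Int) (by exact_mod_cast h2) _ 0 le_rfl
      (by exact_mod_cast Nat.lt_of_lt_of_le Nat.zero_lt_two h2), hmod]
    congr 2
    have : ((k - 1).toNat : Int) = k - 1 := Int.toNat_of_nonneg (by omega)
    rw [this]; ring_nf
  · subst h1
    norm_num at hmod
    simp [solutionLoop, hmod]
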